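-- pv_equiv track=rewrite | github.com/volodinroman/fsearch-maya | fsearch_ui_common.py | _highlight_ranges
-- ===== SOURCE A (Python) =====
-- from typing import Callable, Iterable, List, Optional
--
-- def _highlight_ranges(text: str, tokens: List[str]):
--     """Return merged match ranges for all tokens in text."""
--     text_lower = str(text).lower()
--     ranges = []
--     for token in sorted({t.lower() for t in tokens if t}, key=len, reverse=True):
--         start = 0
--         while True:
--             pos = text_lower.find(token, start)
--             if pos < 0:
--                 break
--             ranges.append((pos, pos + len(token)))
--             start = pos + len(token)
--     if not ranges:
--         return []
--     ranges.sort(key=lambda r: (r[0], r[1]))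
--     merged = [list(ranges[0])]
--     for start, end in ranges[1:]:
--         if start > merged[-1][1]:
--             merged.append([start, end])
--         else:
--             merged[-1][1] = max(merged[-1][1], end)
--     return [(s, e) for s, e in merged]
-- ===== SOURCE B (Python) =====
-- def _highlight_ranges(text, tokens):
--     """Return merged match ranges for all tokens in text."""
--     text_lower = str(text).lower()
--     covered = [False] * len(text_lower)
--     for token in {t.lower() for t in tokens if t}:
--         start = 0
--         while True:
--             pos = text_lower.find(token, start)
--             if pos < 0:
--                 break
--             for i in range(pos, pos + len(token)):
--                 covered[i] = True
--             start = pos + len(token)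
--     ranges = []
--     run_start = None
--     for i, c in enumerate(covered):
--         if c:
--             if run_start is None:
--                 run_start = i
--         elif run_start is not None:
--             ranges.append((run_start, i))
--             run_start = None
--     if run_start is not None:
--         ranges.append((run_start, len(covered)))
--     return ranges
-- ===== Notes on version B (the rewrite author's own statement) =====
-- stated objective: alternative
-- what changed: B replaces A's collect-all-ranges, sort-by-(start,end), fold-merge pipeline by a boolean coverage mask filled during the same find-loops and a single left-to-right scan that emits each maximal covered run.
import Mathlib
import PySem

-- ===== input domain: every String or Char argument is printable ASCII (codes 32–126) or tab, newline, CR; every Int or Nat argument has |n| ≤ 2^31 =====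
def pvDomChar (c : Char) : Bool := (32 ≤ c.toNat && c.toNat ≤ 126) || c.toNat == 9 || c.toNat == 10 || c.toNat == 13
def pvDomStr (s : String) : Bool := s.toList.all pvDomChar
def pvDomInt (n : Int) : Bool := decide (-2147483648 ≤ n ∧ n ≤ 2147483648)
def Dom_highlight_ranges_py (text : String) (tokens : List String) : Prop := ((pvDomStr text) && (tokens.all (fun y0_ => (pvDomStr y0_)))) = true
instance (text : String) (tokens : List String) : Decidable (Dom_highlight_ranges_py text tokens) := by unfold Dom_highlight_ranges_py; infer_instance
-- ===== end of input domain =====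

-- B replaces A's collect-sort-merge of match intervals by a boolean coverage mask filled during
-- the same find-loops and one left-to-right scan emitting maximal covered runs (objective: alternative).

-- termination fact for the shared `while True: pos = text_lower.find(token, start)` loop shape
-- (cited by the decreasing_by of pvFindAll and pvMarkLoop)
theorem pvFindStep (tl tok : List Char) (start : Nat)
    (h : ¬ (PySem.Chars.findFrom tl tok (start : Int) none < 0 ∨ tok = [] ∨ tl.length < start)) :
    start ≤ (PySem.Chars.findFrom tl tok (start : Int) none).toNat ∧
    1 ≤ tok.length ∧
    (PySem.Chars.findFrom tl tok (start : Int) none).toNat + tok.length ≤ tl.length := by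
  rw [not_or, not_or] at h
  obtain ⟨h0, htok, hst⟩ := h
  rw [not_lt] at h0
  rw [not_lt] at hst
  have hne : PySem.Chars.findFrom tl tok (start : Int) none ≠ -1 := by omega
  obtain ⟨hge, hpre, -⟩ := PySem.Chars.findFrom_natCast_spec tl tok start hst hne
  have hlen : tok.length ≤ (tl.drop (PySem.Chars.findFrom tl tok (start : Int) none).toNat).length :=
    hpre.length_le
  simp only [List.length_drop] at hlen
  have htl : 1 ≤ tok.length := by
    cases tok with
    | nil => exact absurd rfl htok
    | cons a l => simp
  omega

-- ===== PORT A =====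
-- the inner `while True` find-loop of A: all (pos, pos+len(token)) occurrence ranges
def pvFindAll (tl tok : List Char) (start : Nat) : List (Nat × Nat) :=
  let pos := PySem.Chars.findFrom tl tok (start : Int) none
  if h : pos < 0 ∨ tok = [] ∨ tl.length < start then []
  else (pos.toNat, pos.toNat + tok.length) :: pvFindAll tl tok (pos.toNat + tok.length)
termination_by tl.length + 1 - start
decreasing_by
  have := pvFindStep tl tok start h
  omega

-- A's merge loop over the sorted ranges (current last interval as explicit state)
def pvMergeLoop (cur : Nat × Nat) : List (Nat × Nat) → List (Nat × Nat)
  | [] => [cur]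
  | r :: rs => if cur.2 < r.1 then cur :: pvMergeLoop r rs else pvMergeLoop (cur.1, max cur.2 r.2) rs

def highlight_ranges_py (text : String) (tokens : List String) : List (Int × Int) :=
  let tl := PySem.Chars.lower text.toList
  let toks := PySem.Set.ofList ((tokens.filter (fun t => t ≠ "")).map PySem.Str.lower)
  let sortedToks := PySem.List.sorted toks (fun t => PySem.Str.len t) true
  let ranges := sortedToks.foldl (fun acc tok => acc ++ pvFindAll tl tok.toList 0) []
  match PySem.List.sorted2 ranges (fun r => r.1) (fun r => r.2) with
  | [] => []
  | r :: rest => (pvMergeLoop r rest).map (fun p => ((p.1 : Int), (p.2 : Int)))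

-- ===== PORT B =====
-- B's find-loop: same search, but sets covered[i] = True over each occurrence
def pvMarkLoop (tl tok : List Char) (start : Nat) (cov : List Bool) : List Bool :=
  let pos := PySem.Chars.findFrom tl tok (start : Int) none
  if h : pos < 0 ∨ tok = [] ∨ tl.length < start then cov
  else pvMarkLoop tl tok (pos.toNat + tok.length)
    ((List.range' pos.toNat tok.length).foldl (fun c i => c.set i true) cov)
termination_by tl.length + 1 - start
decreasing_by
  have := pvFindStep tl tok start h
  omega

-- B's final scan: emit a (run_start, i) range at every True→False transition
def pvRunScan : List Bool → Nat → Option Nat → List (Int × Int)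
  | [], _, none => []
  | [], i, some s => [((s : Int), (i : Int))]
  | c :: cs, i, none => if c then pvRunScan cs (i + 1) (some i) else pvRunScan cs (i + 1) none
  | c :: cs, i, some s =>
      if c then pvRunScan cs (i + 1) (some s)
      else ((s : Int), (i : Int)) :: pvRunScan cs (i + 1) none

def highlight_ranges_py_alt (text : String) (tokens : List String) : List (Int × Int) :=
  let tl := PySem.Chars.lower text.toList
  let toks := PySem.Set.ofList ((tokens.filter (fun t => t ≠ "")).map PySem.Str.lower)
  let covered := toks.foldl (fun cov tok => pvMarkLoop tl tok.toList 0 cov) (List.replicate tl.length false)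
  pvRunScan covered 0 none

-- ===== PRECONDITION & SPEC =====
def Spec_highlight_ranges_py (text : String) (tokens : List String) (out : List (Int × Int)) : Prop := out = highlight_ranges_py_alt text tokens
instance (text : String) (tokens : List String) (out : List (Int × Int)) : Decidable (Spec_highlight_ranges_py text tokens out) := by unfold Spec_highlight_ranges_py; infer_instance

-- ===== CLAIM (what is proved, stated in full; the proofs are below) =====
def Claim_equal_highlight_ranges_py : Prop := ∀ (text : String) (tokens : List String), Dom_highlight_ranges_py text tokens → Spec_highlight_ranges_py text tokens (highlight_ranges_py text tokens)

-- ===== LEMMAS AND PROOFS =====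

-- coverage mask of a list of ranges
def covOf (R : List (Nat × Nat)) (i : Nat) : Bool := R.any (fun p => decide (p.1 ≤ i) && decide (i < p.2))

-- Nat-level mirror of pvRunScan
def natScan : List Bool → Nat → Option Nat → List (Nat × Nat)
  | [], _, none => []
  | [], i, some s => [(s, i)]
  | c :: cs, i, none => if c then natScan cs (i + 1) (some i) else natScan cs (i + 1) none
  | c :: cs, i, some s =>
      if c then natScan cs (i + 1) (some s)
      else (s, i) :: natScan cs (i + 1) none

theorem pvRunScan_eq (cs : List Bool) : ∀ (i : Nat) (st : Option Nat),
    pvRunScan cs i st = (natScan cs i st).map (fun p => ((p.1 : Int), (p.2 : Int))) := by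
  induction cs with
  | nil => intro i st; cases st <;> simp [pvRunScan, natScan]
  | cons c cs ih =>
    intro i st
    cases st <;> simp only [pvRunScan, natScan] <;> split <;> simp [ih]

-- "p is a maximal covered run of cov"
def IsCC (cov : Nat → Bool) (p : Nat × Nat) : Prop :=
  p.1 < p.2 ∧ (∀ i, p.1 ≤ i → i < p.2 → cov i = true) ∧ cov p.2 = false ∧
    (p.1 = 0 ∨ cov (p.1 - 1) = false)

-- "L is the ordered list of all maximal covered runs of cov"
def Decomp (cov : Nat → Bool) (L : List (Nat × Nat)) : Prop :=
  (∀ p ∈ L, IsCC cov p) ∧ L.Pairwise (fun p q => p.2 < q.1) ∧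
    (∀ j, cov j = true → ∃ p ∈ L, p.1 ≤ j ∧ j < p.2)

-- the head of a decomposition starts at the least covered index
theorem decomp_head_least (cov : Nat → Bool) (a b : Nat) (t : List (Nat × Nat))
    (hd : Decomp cov ((a, b) :: t)) : cov a = true ∧ ∀ j, cov j = true → a ≤ j := by
  obtain ⟨hcc, hpw, hcomp⟩ := hd
  obtain ⟨hlt, hint, -, -⟩ := hcc (a, b) List.mem_cons_self
  dsimp only at hlt hint
  refine ⟨hint a le_rfl hlt, ?_⟩
  intro j hj
  obtain ⟨p, hp, hp1, hp2⟩ := hcomp j hj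
  rcases List.mem_cons.mp hp with rfl | hp
  · simpa using hp1
  · have hbp := (List.pairwise_cons.mp hpw).1 p hp
    dsimp only at hbp
    omega

def maskAfter (cov : Nat → Bool) (b : Nat) : Nat → Bool := fun i => if i ≤ b then false else cov i

-- dropping the head of a decomposition decomposes the mask beyond its end
theorem decomp_tail (cov : Nat → Bool) (a b : Nat) (t : List (Nat × Nat))
    (hd : Decomp cov ((a, b) :: t)) : Decomp (maskAfter cov b) t := by
  obtain ⟨hcc, hpw, hcomp⟩ := hd
  rw [List.pairwise_cons] at hpw
  obtain ⟨hhd, hpt⟩ := hpw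
  refine ⟨?_, hpt, ?_⟩
  · intro p hp
    obtain ⟨h1, h2, h3, h4⟩ := hcc p (List.mem_cons_of_mem _ hp)
    have hbp : b < p.1 := by simpa using hhd p hp
    refine ⟨h1, ?_, ?_, ?_⟩
    · intro i hi1 hi2
      have hnb : ¬ i ≤ b := by omega
      simp [maskAfter, hnb, h2 i hi1 hi2]
    · have hnb : ¬ p.2 ≤ b := by omega
      simp [maskAfter, hnb, h3]
    · right
      by_cases hb : p.1 - 1 ≤ b
      · simp [maskAfter, hb]
      · rcases h4 with h4 | h4
        · omega
        · simp [maskAfter, hb, h4]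
  · intro j hj
    simp only [maskAfter] at hj
    by_cases hjb : j ≤ b
    · simp [hjb] at hj
    · rw [if_neg hjb] at hj
      obtain ⟨p, hp, hp1, hp2⟩ := hcomp j hj
      rcases List.mem_cons.mp hp with rfl | hp
      · dsimp only at hp2; omega
      · exact ⟨p, hp, hp1, hp2⟩

theorem decomp_unique (L1 : List (Nat × Nat)) : ∀ (cov : Nat → Bool) (L2 : List (Nat × Nat)),
    Decomp cov L1 → Decomp cov L2 → L1 = L2 := by
  induction L1 with
  | nil =>
    intro cov L2 h1 h2
    cases L2 with
    | nil => rfl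
    | cons q t2 =>
      obtain ⟨a', b'⟩ := q
      have hq := (decomp_head_least cov a' b' t2 h2).1
      obtain ⟨p, hp, -, -⟩ := h1.2.2 a' hq
      exact absurd hp List.not_mem_nil
  | cons p t1 ih =>
    intro cov L2 h1 h2
    obtain ⟨a, b⟩ := p
    cases L2 with
    | nil =>
      have hq := (decomp_head_least cov a b t1 h1).1
      obtain ⟨p, hp, -, -⟩ := h2.2.2 a hq
      exact absurd hp List.not_mem_nil
    | cons q t2 =>
      obtain ⟨a', b'⟩ := q
      have H1 := decomp_head_least cov a b t1 h1
      have H2 := decomp_head_least cov a' b' t2 h2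
      have haa : a = a' := Nat.le_antisymm (H1.2 a' H2.1) (H2.2 a H1.1)
      subst haa
      obtain ⟨hb1l, hb1i, hb1e, -⟩ := h1.1 (a, b) List.mem_cons_self
      obtain ⟨hb2l, hb2i, hb2e, -⟩ := h2.1 (a, b') List.mem_cons_self
      dsimp only at hb1l hb1i hb1e hb2l hb2i hb2e
      have hbb : b = b' := by
        by_contra hne
        rcases Nat.lt_or_ge b b' with hlt | hge
        · have hc : cov b = true := hb2i b (Nat.le_of_lt hb1l) hlt
          rw [hb1e] at hc; exact absurd hc (by simp)
        · have hlt : b' < b := by omega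
          have hc : cov b' = true := hb1i b' (Nat.le_of_lt hb2l) hlt
          rw [hb2e] at hc; exact absurd hc (by simp)
      subst hbb
      have ht := ih (maskAfter cov b) t2 (decomp_tail cov a b t1 h1) (decomp_tail cov a b t2 h2)
      rw [ht]

-- sorted2 with fst/snd keys yields nondecreasing first components
theorem pairwise_insertBy {α : Type} (before : α → α → Bool)
    (htrans : ∀ a b c, before a b = true → before b c = true → before a c = true)
    (hasym : ∀ a b, before a b = true → before b a = false)
    (x : α) (acc : List α) (hacc : acc.Pairwise (fun a b => before b a = false)) :
    (PySem.List.insertBy before x acc).Pairwise (fun a b => before b a = false) := by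
  induction acc with
  | nil => simp [PySem.List.insertBy]
  | cons y ys ih =>
    rw [List.pairwise_cons] at hacc
    obtain ⟨hy, hys⟩ := hacc
    by_cases hxy : before x y = true
    · rw [PySem.List.insertBy, if_pos hxy]
      refine List.Pairwise.cons ?_ (List.Pairwise.cons hy hys)
      intro z hz
      rcases List.mem_cons.mp hz with rfl | hz
      · exact hasym x z hxy
      · by_contra hzx
        have hzx' : before z x = true := by
          cases h' : before z x
          · exact absurd h' hzx
          · rfl
        exact absurd (htrans z x y hzx' hxy) (by simp [hy z hz])
    · rw [PySem.List.insertBy, if_neg hxy]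
      refine List.Pairwise.cons ?_ (ih hys)
      intro z hz
      rw [PySem.List.mem_insertBy] at hz
      rcases hz with rfl | hz
      · cases h' : before z y
        · rfl
        · exact absurd h' hxy
      · exact hy z hz

theorem pairwise_foldl_insertBy {α : Type} (before : α → α → Bool)
    (htrans : ∀ a b c, before a b = true → before b c = true → before a c = true)
    (hasym : ∀ a b, before a b = true → before b a = false)
    (xs : List α) : ∀ (acc : List α), acc.Pairwise (fun a b => before b a = false) →
    (xs.foldl (fun acc x => PySem.List.insertBy before x acc) acc).Pairwise
      (fun a b => before b a = false) := by
  induction xs with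
  | nil => intro acc h; simpa using h
  | cons x xs ih =>
    intro acc h
    exact ih _ (pairwise_insertBy before htrans hasym x acc h)

theorem sorted2_fst_le (R : List (Nat × Nat)) :
    (PySem.List.sorted2 R (fun r => r.1) (fun r => r.2)).Pairwise (fun p q => p.1 ≤ q.1) := by
  have h := pairwise_foldl_insertBy
    (fun a b : Nat × Nat => decide (a.1 < b.1) || (!decide (b.1 < a.1) && decide (a.2 < b.2)))
    (by intro a b c hab hbc
        simp only [Bool.or_eq_true, Bool.and_eq_true, Bool.not_eq_true',
          decide_eq_true_eq, decide_eq_false_iff_not] at *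
        omega)
    (by intro a b hab
        simp only [Bool.or_eq_true, Bool.and_eq_true, Bool.not_eq_true',
          decide_eq_true_eq, decide_eq_false_iff_not] at hab
        simp only [Bool.or_eq_false_iff, Bool.and_eq_false_iff, Bool.not_eq_false',
          decide_eq_false_iff_not, decide_eq_true_eq]
        omega)
    R [] (by simp)
  refine List.Pairwise.imp ?_ h
  intro a b hba
  simp only [Bool.or_eq_false_iff, decide_eq_false_iff_not] at hba
  omega

theorem pvFindAll_good (tl tok : List Char) (start : Nat) :
    ∀ p ∈ pvFindAll tl tok start, p.1 < p.2 ∧ p.2 ≤ tl.length := by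
  fun_induction pvFindAll tl tok start with
  | case1 start pos h => simp
  | case2 start pos h ih =>
    intro p hp
    have hstep : start ≤ pos.toNat ∧ 1 ≤ tok.length ∧ pos.toNat + tok.length ≤ tl.length :=
      pvFindStep tl tok start h
    rcases List.mem_cons.mp hp with rfl | hp
    · exact ⟨by omega, by omega⟩
    · exact ih p hp

theorem setFold_length (l : List Nat) : ∀ (c : List Bool),
    (l.foldl (fun c i => c.set i true) c).length = c.length := by
  induction l with
  | nil => intro c; rfl
  | cons x l ih => intro c; simp [ih, List.length_set]

theorem pvMarkLoop_length (tl tok : List Char) (start : Nat) (cov : List Bool) :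
    (pvMarkLoop tl tok start cov).length = cov.length := by
  fun_induction pvMarkLoop tl tok start cov with
  | case1 start cov pos h => rfl
  | case2 start cov pos h ih => rw [ih, setFold_length]

theorem setRange_getD (k : Nat) : ∀ (p : Nat) (c : List Bool) (i : Nat), p + k ≤ c.length →
    ((List.range' p k).foldl (fun c j => c.set j true) c).getD i false =
      (c.getD i false || decide (p ≤ i ∧ i < p + k)) := by
  induction k with
  | zero => intro p c i _; simp
  | succ k ih =>
    intro p c i hlen
    rw [List.range'_succ]
    simp only [List.foldl_cons]
    rw [ih (p + 1) (c.set p true) i (by simp only [List.length_set]; omega)]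
    by_cases hip : i = p
    · subst hip
      have h1 : (c.set i true).getD i false = true := by
        simp [List.getD, show i < c.length by omega]
      rw [h1]
      simp only [Bool.true_or]
      have : decide (i ≤ i ∧ i < i + (k + 1)) = true := by simp
      rw [this, Bool.or_true]
    · have h1 : (c.set p true).getD i false = c.getD i false := by
        simp [List.getD, List.getElem?_set_ne (show p ≠ i from fun h => hip h.symm)]
      rw [h1]
      have h2 : (decide (p + 1 ≤ i ∧ i < p + 1 + k)) = (decide (p ≤ i ∧ i < p + (k + 1))) := by
        simp only [decide_eq_decide]; omega
      rw [h2]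

theorem pvMarkLoop_getD (tl tok : List Char) (start : Nat) (cov : List Bool) :
    tl.length ≤ cov.length → ∀ (i : Nat),
    (pvMarkLoop tl tok start cov).getD i false =
      (cov.getD i false || covOf (pvFindAll tl tok start) i) := by
  fun_induction pvMarkLoop tl tok start cov with
  | case1 start cov pos h =>
    intro hlen i
    rw [pvFindAll, dif_pos h]
    simp [covOf]
  | case2 start cov pos h ih =>
    intro hlen i
    have hstep : start ≤ pos.toNat ∧ 1 ≤ tok.length ∧ pos.toNat + tok.length ≤ tl.length :=
      pvFindStep tl tok start h
    rw [pvFindAll, dif_neg h]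
    rw [ih (by rw [setFold_length]; exact hlen) i]
    rw [setRange_getD tok.length _ cov i (by omega)]
    simp only [covOf, List.any_cons]
    rw [Bool.or_assoc]
    congr 2
    rw [Bool.decide_and]

theorem merge_spec (cov : Nat → Bool) (S : List (Nat × Nat)) : ∀ (s e : Nat),
    s < e →
    (∀ i, s ≤ i → i < e → cov i = true) →
    (s = 0 ∨ cov (s - 1) = false) →
    (∀ p ∈ S, p.1 < p.2 ∧ s ≤ p.1 ∧ ∀ i, p.1 ≤ i → i < p.2 → cov i = true) →
    S.Pairwise (fun p q => p.1 ≤ q.1) →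
    (∀ j, s ≤ j → cov j = true → j < e ∨ ∃ p ∈ S, p.1 ≤ j ∧ j < p.2) →
    (∀ p ∈ pvMergeLoop (s, e) S, IsCC cov p ∧ s ≤ p.1) ∧
    (pvMergeLoop (s, e) S).Pairwise (fun p q => p.2 < q.1) ∧
    (∀ j, s ≤ j → cov j = true → ∃ p ∈ pvMergeLoop (s, e) S, p.1 ≤ j ∧ j < p.2) := by
  induction S with
  | nil =>
    intro s e hse hint hstart _hS _hpw hcomp
    simp only [pvMergeLoop]
    have hcove : cov e = false := by
      cases hcv : cov e
      · rfl
      · rcases hcomp e (by omega) hcv with h | ⟨p, hp, -, -⟩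
        · omega
        · exact absurd hp List.not_mem_nil
    refine ⟨?_, by simp, ?_⟩
    · intro p hp
      rcases List.mem_singleton.mp hp with rfl
      exact ⟨⟨hse, hint, hcove, hstart⟩, le_rfl⟩
    · intro j hj hcov
      rcases hcomp j hj hcov with h | ⟨p, hp, -, -⟩
      · exact ⟨(s, e), List.mem_singleton.mpr rfl, hj, h⟩
      · exact absurd hp List.not_mem_nil
  | cons r S' ih =>
    intro s e hse hint hstart hS hpw hcomp
    obtain ⟨s', e'⟩ := r
    obtain ⟨hgood', hss', hint'⟩ := hS (s', e') List.mem_cons_self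
    dsimp only at hgood' hss' hint'
    rw [List.pairwise_cons] at hpw
    obtain ⟨hhd, hpw'⟩ := hpw
    simp only [pvMergeLoop]
    by_cases hcase : e < s'
    · rw [if_pos hcase]
      have hcove : cov e = false := by
        cases hcv : cov e
        · rfl
        · rcases hcomp e (by omega) hcv with h | ⟨p, hp, hp1, hp2⟩
          · omega
          · rcases List.mem_cons.mp hp with rfl | hp
            · dsimp only at hp1; omega
            · have := hhd p hp; dsimp only at this; omega
      have hs'1 : cov (s' - 1) = false := by
        cases hcv : cov (s' - 1)
        · rfl
        · exfalso
          rcases hcomp (s' - 1) (by omega) hcv with h | ⟨p, hp, hp1, hp2⟩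
          · omega
          · rcases List.mem_cons.mp hp with rfl | hp
            · dsimp only at hp1; omega
            · have := hhd p hp; dsimp only at this; omega
      have IH := ih s' e' hgood' hint' (Or.inr hs'1)
        (fun p hp => ⟨(hS p (List.mem_cons_of_mem _ hp)).1,
          (by have := hhd p hp; dsimp only at this; exact this),
          (hS p (List.mem_cons_of_mem _ hp)).2.2⟩)
        hpw'
        (by
          intro j hj hcov
          rcases hcomp j (by omega) hcov with h | ⟨p, hp, hp1, hp2⟩
          · omega
          · rcases List.mem_cons.mp hp with rfl | hp
            · dsimp only at hp2; exact Or.inl hp2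
            · exact Or.inr ⟨p, hp, hp1, hp2⟩)
      refine ⟨?_, ?_, ?_⟩
      · intro p hp
        rcases List.mem_cons.mp hp with rfl | hp
        · exact ⟨⟨hse, hint, hcove, hstart⟩, le_rfl⟩
        · exact ⟨(IH.1 p hp).1, by have := (IH.1 p hp).2; omega⟩
      · rw [List.pairwise_cons]
        refine ⟨?_, IH.2.1⟩
        intro q hq
        have := (IH.1 q hq).2
        dsimp only
        omega
      · intro j hj hcov
        rcases hcomp j hj hcov with h | ⟨p, hp, hp1, hp2⟩
        · exact ⟨(s, e), List.mem_cons_self, hj, h⟩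
        · have hjs' : s' ≤ j := by
            rcases List.mem_cons.mp hp with rfl | hp'
            · dsimp only at hp1; omega
            · have := hhd p hp'; dsimp only at this; omega
          obtain ⟨q, hq, hq1, hq2⟩ := IH.2.2 j hjs' hcov
          exact ⟨q, List.mem_cons_of_mem _ hq, hq1, hq2⟩
    · rw [if_neg hcase]
      have hs'e : s' ≤ e := by omega
      have IH := ih s (max e e') (by omega)
        (by
          intro i hi1 hi2
          by_cases hie : i < e
          · exact hint i hi1 hie
          · exact hint' i (by omega) (by omega))
        hstart
        (fun p hp => (hS p (List.mem_cons_of_mem _ hp)))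
        hpw'
        (by
          intro j hj hcov
          rcases hcomp j hj hcov with h | ⟨p, hp, hp1, hp2⟩
          · left; omega
          · rcases List.mem_cons.mp hp with rfl | hp
            · dsimp only at hp2; left; omega
            · exact Or.inr ⟨p, hp, hp1, hp2⟩)
      exact IH

theorem scan_spec (full : List Bool) : ∀ (rest : List Bool) (i : Nat) (st : Option Nat),
    rest = full.drop i → i ≤ full.length →
    (∀ s, st = some s → s < i ∧ (∀ j, s ≤ j → j < i → full.getD j false = true) ∧
      (s = 0 ∨ full.getD (s - 1) false = false)) →
    (st = none → i = 0 ∨ full.getD (i - 1) false = false) →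
    (∀ p ∈ natScan rest i st, IsCC (fun j => full.getD j false) p ∧
        (match st with | none => i | some s => s) ≤ p.1) ∧
    (natScan rest i st).Pairwise (fun p q => p.2 < q.1) ∧
    (∀ j, (match st with | none => i | some s => s) ≤ j → full.getD j false = true →
      ∃ p ∈ natScan rest i st, p.1 ≤ j ∧ j < p.2) := by
  intro rest
  induction rest with
  | nil =>
    intro i st hdrop hle hsome hnone
    have hi : i = full.length := by
      have := List.drop_eq_nil_iff.mp hdrop.symm
      omega
    have hout : ∀ j, i ≤ j → full.getD j false = false := by
      intro j hj
      simp [List.getD, List.getElem?_eq_none (by omega : full.length ≤ j)]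
    cases st with
    | none =>
      simp only [natScan]
      refine ⟨by simp, by simp, ?_⟩
      intro j hj hcov
      rw [hout j hj] at hcov
      exact absurd hcov (by simp)
    | some s =>
      obtain ⟨hsi, hintv, hsst⟩ := hsome s rfl
      simp only [natScan]
      refine ⟨?_, by simp, ?_⟩
      · intro p hp
        rcases List.mem_singleton.mp hp with rfl
        exact ⟨⟨hsi, hintv, hout i le_rfl, hsst⟩, le_rfl⟩
      · intro j hj hcov
        have hji : j < i := by
          by_contra hge
          rw [hout j (by omega)] at hcov
          exact absurd hcov (by simp)
        exact ⟨(s, i), List.mem_singleton.mpr rfl, hj, hji⟩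
  | cons c cs ihh =>
    intro i st hdrop hle hsome hnone
    have hi : i < full.length := by
      by_contra hge
      rw [List.drop_eq_nil_iff.mpr (by omega)] at hdrop
      exact absurd hdrop (by simp)
    have hsplit : full.drop i = full[i] :: full.drop (i + 1) := List.drop_eq_getElem_cons hi
    rw [hsplit] at hdrop
    have hc : c = full[i] := (List.cons.injEq _ _ _ _ ▸ hdrop).1
    have hcs : cs = full.drop (i + 1) := (List.cons.injEq _ _ _ _ ▸ hdrop).2
    have hcgd : full.getD i false = c := by
      rw [List.getD, List.getElem?_eq_getElem hi]; simp [hc]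
    cases st with
    | none =>
      simp only [natScan]
      by_cases hcv : c = true
      · rw [if_pos hcv]
        have IH := ihh (i + 1) (some i) hcs (by omega)
          (by
            intro s hs
            cases hs
            refine ⟨by omega, ?_, hnone rfl⟩
            intro j hj1 hj2
            have : j = i := by omega
            subst this
            rw [hcgd, hcv])
          (by intro h; cases h)
        exact IH
      · rw [if_neg hcv]
        have hcf : full.getD i false = false := by
          rw [hcgd]; cases hcb : c
          · rfl
          · exact absurd hcb hcv
        have IH := ihh (i + 1) none hcs (by omega)
          (by intro s hs; cases hs)
          (by intro _; right; simpa using hcf)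
        refine ⟨?_, IH.2.1, ?_⟩
        · intro p hp
          refine ⟨(IH.1 p hp).1, ?_⟩
          have h9 := (IH.1 p hp).2
          dsimp only at h9 ⊢
          omega
        · intro j hj hcov
          have hji : i + 1 ≤ j := by
            rcases Nat.eq_or_lt_of_le hj with rfl | h
            · rw [hcf] at hcov; exact absurd hcov (by simp)
            · omega
          exact IH.2.2 j hji hcov
    | some s =>
      obtain ⟨hsi, hintv, hsst⟩ := hsome s rfl
      simp only [natScan]
      by_cases hcv : c = true
      · rw [if_pos hcv]
        have IH := ihh (i + 1) (some s) hcs (by omega)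
          (by
            intro s0 hs0
            cases hs0
            refine ⟨by omega, ?_, hsst⟩
            intro j hj1 hj2
            by_cases hji : j < i
            · exact hintv j hj1 hji
            · have : j = i := by omega
              subst this
              rw [hcgd, hcv])
          (by intro h; cases h)
        exact IH
      · rw [if_neg hcv]
        have hcf : full.getD i false = false := by
          rw [hcgd]; cases hcb : c
          · rfl
          · exact absurd hcb hcv
        have IH := ihh (i + 1) none hcs (by omega)
          (by intro s0 hs0; cases hs0)
          (by intro _; right; simpa using hcf)
        refine ⟨?_, ?_, ?_⟩
        · intro p hp
          rcases List.mem_cons.mp hp with rfl | hp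
          · exact ⟨⟨hsi, hintv, hcf, hsst⟩, le_rfl⟩
          · refine ⟨(IH.1 p hp).1, ?_⟩
            have h9 := (IH.1 p hp).2
            dsimp only at h9 ⊢
            omega
        · rw [List.pairwise_cons]
          refine ⟨?_, IH.2.1⟩
          intro q hq
          have h9 := (IH.1 q hq).2
          dsimp only at h9 ⊢
          omega
        · intro j hj hcov
          by_cases hji : j < i
          · exact ⟨(s, i), List.mem_cons_self, hj, hji⟩
          · have hji1 : i + 1 ≤ j := by
              rcases Nat.eq_or_lt_of_le (Nat.le_of_not_lt hji) with rfl | h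
              · rw [hcf] at hcov; exact absurd hcov (by simp)
              · omega
            obtain ⟨q, hq, hq1, hq2⟩ := IH.2.2 j hji1 hcov
            exact ⟨q, List.mem_cons_of_mem _ hq, hq1, hq2⟩

theorem foldl_mark_length (tl : List Char) (ts : List String) : ∀ (cov : List Bool),
    (ts.foldl (fun cov tok => pvMarkLoop tl tok.toList 0 cov) cov).length = cov.length := by
  induction ts with
  | nil => intro cov; rfl
  | cons t ts ih => intro cov; rw [List.foldl_cons, ih, pvMarkLoop_length]

theorem foldl_mark_getD (tl : List Char) (ts : List String) : ∀ (cov : List Bool),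
    tl.length ≤ cov.length → ∀ (i : Nat),
    (ts.foldl (fun cov tok => pvMarkLoop tl tok.toList 0 cov) cov).getD i false =
      (cov.getD i false || covOf (ts.flatMap (fun t => pvFindAll tl t.toList 0)) i) := by
  induction ts with
  | nil => intro cov _ i; simp [covOf]
  | cons t ts ih =>
    intro cov hlen i
    rw [List.foldl_cons, ih _ (by rw [pvMarkLoop_length]; exact hlen) i,
      pvMarkLoop_getD tl t.toList 0 cov hlen i, List.flatMap_cons]
    simp only [covOf, List.any_append]
    rw [Bool.or_assoc]

theorem covOf_perm {l1 l2 : List String} (h : l1.Perm l2) (f : String → List (Nat × Nat))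
    (i : Nat) : covOf (l1.flatMap f) i = covOf (l2.flatMap f) i := by
  simp only [covOf]
  rw [Bool.eq_iff_iff]
  simp only [List.any_eq_true, List.mem_flatMap]
  constructor <;> rintro ⟨p, ⟨t, ht, hp⟩, hio⟩
  · exact ⟨p, ⟨t, h.mem_iff.mp ht, hp⟩, hio⟩
  · exact ⟨p, ⟨t, h.mem_iff.mpr ht, hp⟩, hio⟩

theorem covOf_of_mem {R : List (Nat × Nat)} {p : Nat × Nat} (hp : p ∈ R) {i : Nat}
    (h1 : p.1 ≤ i) (h2 : i < p.2) : covOf R i = true := by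
  simp only [covOf, List.any_eq_true]
  exact ⟨p, hp, by simp [h1, h2]⟩

theorem covOf_mem {R : List (Nat × Nat)} {i : Nat} (h : covOf R i = true) :
    ∃ p ∈ R, p.1 ≤ i ∧ i < p.2 := by
  simp only [covOf, List.any_eq_true] at h
  obtain ⟨p, hp, hpi⟩ := h
  simp only [Bool.and_eq_true, decide_eq_true_eq] at hpi
  exact ⟨p, hp, hpi⟩

theorem getD_replicate_false (n i : Nat) : (List.replicate n false).getD i false = false := by
  rw [List.getD, List.getElem?_replicate]
  split <;> rfl

-- ===== VERDICT (by name: the statement is the Claim_ definition above) =====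
theorem highlight_ranges_py_spec : Claim_equal_highlight_ranges_py := by
  unfold Claim_equal_highlight_ranges_py
  intro text tokens _hdom
  unfold Spec_highlight_ranges_py
  dsimp only [highlight_ranges_py, highlight_ranges_py_alt]
  set tl := PySem.Chars.lower text.toList with htl
  set toks := PySem.Set.ofList ((tokens.filter (fun t => t ≠ "")).map PySem.Str.lower) with htoks
  set sortedToks := PySem.List.sorted toks (fun t => PySem.Str.len t) true with hsorted
  set RA := sortedToks.foldl (fun acc tok => acc ++ pvFindAll tl tok.toList 0) [] with hRAdef
  set covered := toks.foldl (fun cov tok => pvMarkLoop tl tok.toList 0 cov)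
    (List.replicate tl.length false) with hcovdef
  have hperm : sortedToks.Perm toks := PySem.List.sorted_perm toks (fun t => PySem.Str.len t) true
  have hRAflat : RA = sortedToks.flatMap (fun t => pvFindAll tl t.toList 0) := by
    rw [hRAdef]
    simpa using PySem.List.foldl_append_eq_flatMap (fun t => pvFindAll tl t.toList 0) sortedToks []
  have hcovlen : covered.length = tl.length := by
    rw [hcovdef, foldl_mark_length, List.length_replicate]
  have hcovB : ∀ i, covered.getD i false = covOf RA i := by
    intro i
    rw [hcovdef, foldl_mark_getD tl toks _ (by simp) i, getD_replicate_false, Bool.false_or,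
      covOf_perm hperm.symm, hRAflat]
  have hgood : ∀ p ∈ RA, p.1 < p.2 ∧ p.2 ≤ tl.length := by
    intro p hp
    rw [hRAflat] at hp
    obtain ⟨t, -, hpt⟩ := List.mem_flatMap.mp hp
    exact pvFindAll_good tl t.toList 0 p hpt
  have hmemRA : ∀ p, p ∈ PySem.List.sorted2 RA (fun r => r.1) (fun r => r.2) ↔ p ∈ RA :=
    fun p => (PySem.List.sorted2_perm RA _ _ false).mem_iff
  have hpwS := sorted2_fst_le RA
  -- B's scan is a decomposition of the mask
  have TB := scan_spec covered covered 0 none List.drop_zero.symm (Nat.zero_le _)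
    (by intro s hs; cases hs) (fun _ => Or.inl rfl)
  have DB : Decomp (fun j => covered.getD j false) (natScan covered 0 none) :=
    ⟨fun p hp => (TB.1 p hp).1, TB.2.1, fun j hc => TB.2.2 j (Nat.zero_le j) hc⟩
  have hfun : (fun j => covered.getD j false) = (fun j => covOf RA j) := funext hcovB
  rw [hfun] at DB
  cases hS : PySem.List.sorted2 RA (fun r => r.1) (fun r => r.2) with
  | nil =>
    have hRAnil : RA = [] := ((hS ▸ PySem.List.sorted2_perm RA (fun r => r.1) (fun r => r.2) false)).symm.eq_nil
    have DN : Decomp (fun j => covOf RA j) [] := by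
      refine ⟨by simp, by simp, ?_⟩
      intro j hc
      rw [hRAnil] at hc
      simp [covOf] at hc
    rw [pvRunScan_eq, decomp_unique _ _ _ DB DN]
    rfl
  | cons r rest =>
    obtain ⟨s, e⟩ := r
    dsimp only
    rw [hS] at hpwS
    rw [List.pairwise_cons] at hpwS
    obtain ⟨hhd, hpw'⟩ := hpwS
    have hmem_head : (s, e) ∈ RA := (hmemRA (s, e)).mp (hS ▸ List.mem_cons_self)
    have hgood_head := hgood (s, e) hmem_head
    dsimp only at hgood_head
    have TA := merge_spec (fun j => covOf RA j) rest s e hgood_head.1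
      (by
        intro i hi1 hi2
        exact covOf_of_mem hmem_head hi1 hi2)
      (by
        by_cases hs0 : s = 0
        · exact Or.inl hs0
        · right
          cases hcv : covOf RA (s - 1)
          · exact hcv
          · exfalso
            obtain ⟨p, hp, hp1, hp2⟩ := covOf_mem hcv
            have hpS := (hmemRA p).mpr hp
            rw [hS] at hpS
            rcases List.mem_cons.mp hpS with rfl | hpS
            · dsimp only at hp1; omega
            · have := hhd p hpS; dsimp only at this; omega)
      (by
        intro p hp
        have hpRA := (hmemRA p).mp (hS ▸ List.mem_cons_of_mem _ hp)
        refine ⟨(hgood p hpRA).1, (by have := hhd p hp; dsimp only at this; exact this), ?_⟩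
        intro i hi1 hi2
        exact covOf_of_mem hpRA hi1 hi2)
      hpw'
      (by
        intro j hj hcov
        obtain ⟨p, hp, hp1, hp2⟩ := covOf_mem hcov
        have hpS := (hmemRA p).mpr hp
        rw [hS] at hpS
        rcases List.mem_cons.mp hpS with rfl | hpS
        · dsimp only at hp2; exact Or.inl hp2
        · exact Or.inr ⟨p, hpS, hp1, hp2⟩)
    have DA : Decomp (fun j => covOf RA j) (pvMergeLoop (s, e) rest) := by
      refine ⟨fun p hp => (TA.1 p hp).1, TA.2.1, ?_⟩
      intro j hc
      have hjs : s ≤ j := by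
        obtain ⟨p, hp, hp1, hp2⟩ := covOf_mem hc
        have hpS := (hmemRA p).mpr hp
        rw [hS] at hpS
        rcases List.mem_cons.mp hpS with rfl | hpS
        · dsimp only at hp1; omega
        · have := hhd p hpS; dsimp only at this; omega
      exact TA.2.2 j hjs hc
    rw [pvRunScan_eq, decomp_unique _ _ _ DA DB]
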